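-- pv_equiv track=rewrite | github.com/olsenw/LeetCodeExercises | Python3/check_if_number_is_a_sum_powers_of_three.py | checkPowersOfThree_backtracking
-- ===== SOURCE A (Python) =====
-- from functools import cache
--
-- def checkPowersOfThree_backtracking(n: int) -> bool:
--     power = [3**i for i in range(17)]
--     @cache
--     def dp(n, i):
--         if n == 0:
--             return True
--         if i == len(power) or n < power[i]:
--             return False
--         return any(dp(n-power[i], i+1) for i in range(i,17))
--     return dp(n, 0)
-- ===== SOURCE B (Python) =====
-- def checkPowersOfThree_backtracking(n: int) -> bool:
--     # base-3 digit check: n is a sum of distinct powers of three iff no base-3 digit is 2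
--     while n > 0:
--         if n % 3 == 2:
--             return False
--         n //= 3
--     return n == 0
-- ===== Notes on version B (the rewrite author's own statement) =====
-- stated objective: faster
-- what changed: Replaced the memoized backtracking search over subsets of a hard-coded table of the 17 powers 3^0..3^16 by a single base-3 digit scan: n is a sum of distinct powers of three iff no base-3 digit of n is 2.
-- intended difference: For n >= 3^17 whose base-3 digits are all 0 or 1 (e.g. n = 3^17 itself), A returns False because its power table is hard-coded to stop at 3^16, while B returns True, which is the intended answer since such n really is a sum of distinct powers of three. — e.g. on checkPowersOfThree_backtracking(129140163): A returns false, B returns true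
import Mathlib
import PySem

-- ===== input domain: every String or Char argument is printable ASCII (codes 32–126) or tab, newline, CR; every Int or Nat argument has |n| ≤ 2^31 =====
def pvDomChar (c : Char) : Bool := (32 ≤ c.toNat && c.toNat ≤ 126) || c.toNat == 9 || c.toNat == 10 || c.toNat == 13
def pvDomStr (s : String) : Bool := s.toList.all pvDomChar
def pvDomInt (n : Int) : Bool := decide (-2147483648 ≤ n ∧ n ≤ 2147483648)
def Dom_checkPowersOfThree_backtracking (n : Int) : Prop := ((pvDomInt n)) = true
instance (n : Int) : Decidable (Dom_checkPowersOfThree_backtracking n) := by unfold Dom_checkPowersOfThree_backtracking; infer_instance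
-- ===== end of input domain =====

-- B replaces the memoized backtracking over a hard-coded table of the 17 powers 3^0..3^16 by a
-- single base-3 digit scan (faster); on n ≥ 3^17 with all base-3 digits ≤ 1, A's table runs out and
-- it answers false although n IS a sum of distinct powers of three — see D_ below.

-- ===== PORT A =====
-- power = [3**i for i in range(17)]
def pvPowerA : List Int := (List.range 17).map (fun i => (3:Int)^i)

-- dp(n, i) of A; the @cache decorator affects only speed, not the value, and is not ported
def pvDpA (n : Int) (i : Nat) : Bool :=
  if n == 0 then true
  else if i == 17 || decide (n < pvPowerA.getD i 0) then false
  else (List.range' i (17 - i)).attach.any (fun j => pvDpA (n - pvPowerA.getD j.1 0) (j.1 + 1))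
termination_by 17 - i
decreasing_by
  have := List.mem_range'_1.mp j.2
  omega

def checkPowersOfThree_backtracking (n : Int) : Bool := pvDpA n 0

-- ===== PORT B =====
-- while n > 0: if n % 3 == 2: return False; n //= 3
-- return n == 0
def pvLoopB (n : Int) : Bool :=
  if _h : n > 0 then
    if PySem.Int.mod n 3 == 2 then false
    else pvLoopB (PySem.Int.floordiv n 3)
  else decide (n = 0)
termination_by n.toNat
decreasing_by
  rw [PySem.Int.floordiv_eq_ediv_of_pos (by norm_num)]
  omega

def checkPowersOfThree_backtracking_alt (n : Int) : Bool := pvLoopB n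

-- ===== PRECONDITION & SPEC =====
-- For n ≥ 3^17 whose base-3 digits are all 0 or 1 (e.g. n = 3^17), A returns false because its
-- power table is hard-coded to stop at 3^16, while B returns true, the intended answer, since such
-- n really is a sum of distinct powers of three.
def D_checkPowersOfThree_backtracking (n : Int) : Prop :=
  3 ^ 17 ≤ n ∧ (Nat.digits 3 n.toNat).all (fun d => decide (d ≤ 1)) = true
instance (n : Int) : Decidable (D_checkPowersOfThree_backtracking n) := by
  unfold D_checkPowersOfThree_backtracking; infer_instance

def Spec_checkPowersOfThree_backtracking (n : Int) (out : Bool) : Prop :=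
  ¬ D_checkPowersOfThree_backtracking n → out = checkPowersOfThree_backtracking_alt n
instance (n : Int) (out : Bool) : Decidable (Spec_checkPowersOfThree_backtracking n out) := by
  unfold Spec_checkPowersOfThree_backtracking; infer_instance

def pvDiffWitness_checkPowersOfThree_backtracking : Int := 129140163

def pvDiffWitnessOut_checkPowersOfThree_backtracking : Bool × Bool := (false, true)

-- ===== CLAIM (what is proved, stated in full; the proofs are below) =====
def Claim_unchanged_checkPowersOfThree_backtracking : Prop := ∀ (n : Int), Dom_checkPowersOfThree_backtracking n → Spec_checkPowersOfThree_backtracking n (checkPowersOfThree_backtracking n)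
def Claim_changed_checkPowersOfThree_backtracking : Prop := Dom_checkPowersOfThree_backtracking (pvDiffWitness_checkPowersOfThree_backtracking) ∧ D_checkPowersOfThree_backtracking (pvDiffWitness_checkPowersOfThree_backtracking) ∧ checkPowersOfThree_backtracking (pvDiffWitness_checkPowersOfThree_backtracking) = pvDiffWitnessOut_checkPowersOfThree_backtracking.1 ∧ checkPowersOfThree_backtracking_alt (pvDiffWitness_checkPowersOfThree_backtracking) = pvDiffWitnessOut_checkPowersOfThree_backtracking.2 ∧ pvDiffWitnessOut_checkPowersOfThree_backtracking.1 ≠ pvDiffWitnessOut_checkPowersOfThree_backtracking.2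
def Claim_exact_checkPowersOfThree_backtracking : Prop := ∀ (n : Int), Dom_checkPowersOfThree_backtracking n → D_checkPowersOfThree_backtracking n → checkPowersOfThree_backtracking n ≠ checkPowersOfThree_backtracking_alt n

-- ===== LEMMAS AND PROOFS =====

-- "no base-3 digit of N is 2", expressed arithmetically
def pvNoTwo (N : ℕ) : Prop := ∀ j, N / 3 ^ j % 3 ≠ 2

theorem pvNoTwo_zero : pvNoTwo 0 := by intro j; simp

theorem pvNoTwo_iff (N : ℕ) : pvNoTwo N ↔ N % 3 ≠ 2 ∧ pvNoTwo (N / 3) := by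
  constructor
  · intro h
    refine ⟨by simpa using h 0, fun j => ?_⟩
    have := h (j + 1)
    rw [Nat.div_div_eq_div_mul, ← pow_succ']
    exact this
  · rintro ⟨h0, h⟩ j
    cases j with
    | zero => simpa using h0
    | succ j =>
      have := h j
      rw [pow_succ', ← Nat.div_div_eq_div_mul]
      exact this

theorem pvDigits_all_iff (N : ℕ) :
    ((Nat.digits 3 N).all (fun d => decide (d ≤ 1)) = true) ↔ pvNoTwo N := by
  induction N using Nat.strong_induction_on with
  | _ N ih =>
    rcases Nat.eq_zero_or_pos N with h0 | hp
    · subst h0; simp [pvNoTwo]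
    · have hlt : N / 3 < N := Nat.div_lt_self hp (by norm_num)
      rw [Nat.digits_def' (by norm_num : (1:ℕ) < 3) hp]
      rw [pvNoTwo_iff]
      simp only [List.all_cons, Bool.and_eq_true, decide_eq_true_eq, ih _ hlt]
      have hm : N % 3 < 3 := Nat.mod_lt N (by norm_num)
      constructor <;> rintro ⟨h1, h2⟩ <;> exact ⟨by omega, h2⟩

-- characterisation of B's loop
theorem pvLoopB_char (n : Int) : pvLoopB n = true ↔ 0 ≤ n ∧ pvNoTwo n.toNat := by
  induction hN : n.toNat using Nat.strong_induction_on generalizing n with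
  | _ N ih =>
    subst hN
    rw [pvLoopB]
    by_cases hp : n > 0
    · rw [dif_pos hp]
      rw [PySem.Int.mod_eq_emod_of_pos (by norm_num), PySem.Int.floordiv_eq_ediv_of_pos (by norm_num)]
      by_cases h2 : n % 3 = 2
      · rw [if_pos (by simpa using h2)]
        simp only [Bool.false_eq_true, false_iff]
        rintro ⟨h0, hnt⟩
        apply hnt 0
        simp only [pow_zero, Nat.div_one]
        omega
      · rw [if_neg (by simpa using h2)]
        have hlt : (n / 3).toNat < n.toNat := by omega
        rw [ih _ hlt _ rfl]
        have e1 : (n / 3).toNat = n.toNat / 3 := by omega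
        rw [e1, pvNoTwo_iff n.toNat]
        have h2' : n.toNat % 3 ≠ 2 := by omega
        constructor
        · rintro ⟨_, hh⟩; exact ⟨by omega, h2', hh⟩
        · rintro ⟨_, _, hh⟩; exact ⟨by omega, hh⟩
    · rw [dif_neg hp]
      constructor
      · intro h
        have h0 : n = 0 := by simpa using h
        subst h0
        exact ⟨le_refl 0, by simpa using pvNoTwo_zero⟩
      · rintro ⟨h0, _⟩
        have : n = 0 := by omega
        simp [this]

-- N is a sum of distinct powers 3^j with i ≤ j < k
def pvRep (i k N : ℕ) : Prop :=
  ∃ S : Finset ℕ, (∀ j ∈ S, i ≤ j ∧ j < k) ∧ N = ∑ j ∈ S, 3 ^ j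

theorem pvPowerA_getD (i : Nat) (hi : i < 17) : pvPowerA.getD i 0 = 3 ^ i := by
  simp [pvPowerA, List.getD_eq_getElem?_getD, hi]

-- characterisation of A's dp
theorem pvDpA_char : ∀ k i, 17 - i = k → i ≤ 17 → ∀ n : Int,
    (pvDpA n i = true ↔ 0 ≤ n ∧ pvRep i 17 n.toNat) := by
  intro k
  induction k using Nat.strong_induction_on with
  | _ k ih =>
    intro i hk hi n
    rw [pvDpA]
    by_cases h0 : n = 0
    · subst h0
      have hrep : pvRep i 17 0 := ⟨∅, by simp, by simp⟩
      simp [hrep]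
    · rw [if_neg (by simpa using h0)]
      by_cases h17 : i = 17
      · subst h17
        rw [if_pos (by simp)]
        simp only [Bool.false_eq_true, false_iff]
        rintro ⟨hnn, S, hS, hsum⟩
        have hSe : S = ∅ := Finset.eq_empty_of_forall_notMem (by
          intro x hx
          have := hS x hx
          omega)
        subst hSe
        simp at hsum
        omega
      · have hi' : i < 17 := lt_of_le_of_ne hi h17
        rw [pvPowerA_getD i hi']
        by_cases hlt : n < (3:ℤ) ^ i
        · rw [if_pos (by simp [hlt])]
          simp only [Bool.false_eq_true, false_iff]
          rintro ⟨hnn, S, hS, hsum⟩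
          have hNne : n.toNat ≠ 0 := by omega
          have hSne : S.Nonempty := by
            by_contra hemp
            rw [Finset.not_nonempty_iff_eq_empty] at hemp
            subst hemp
            simp at hsum
            omega
          obtain ⟨j0, hj0⟩ := hSne
          have hle1 : (3:ℕ) ^ i ≤ 3 ^ j0 := Nat.pow_le_pow_right (by norm_num) (hS j0 hj0).1
          have hle2 : (3:ℕ) ^ j0 ≤ n.toNat := by
            rw [hsum]
            exact Finset.single_le_sum (fun x _ => Nat.zero_le _) hj0
          have hcast : ((3 ^ i : ℕ) : ℤ) = (3:ℤ) ^ i := by push_cast; ring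
          have : ((3 ^ i : ℕ) : ℤ) ≤ n := by omega
          rw [hcast] at this
          omega
        · rw [if_neg (by
            simp only [Bool.or_eq_true, beq_iff_eq, decide_eq_true_eq]
            rintro (h | h)
            exacts [h17 h, hlt h])]
          rw [List.any_eq_true]
          simp only [List.mem_attach, true_and, Subtype.exists]
          constructor
          · rintro ⟨j, hj, hdp⟩
            obtain ⟨hij, hj17'⟩ := List.mem_range'_1.mp hj
            have hj17 : j < 17 := by omega
            rw [pvPowerA_getD j hj17] at hdp
            rw [ih (17 - (j + 1)) (by omega) (j + 1) rfl (by omega)] at hdp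
            obtain ⟨hnn, S', hS', hsum'⟩ := hdp
            have h3nn : (0:ℤ) ≤ 3 ^ j := by positivity
            have hcast : ((3 ^ j : ℕ) : ℤ) = (3:ℤ) ^ j := by push_cast; ring
            have hPle : (3:ℕ) ^ j ≤ n.toNat := by omega
            have hsub : (n - (3:ℤ) ^ j).toNat = n.toNat - 3 ^ j := by omega
            rw [hsub] at hsum'
            have hjS' : j ∉ S' := fun h => by have := (hS' j h).1; omega
            refine ⟨by omega, insert j S', ?_, ?_⟩
            · intro x hx
              rcases Finset.mem_insert.mp hx with rfl | hx
              · exact ⟨hij, hj17⟩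
              · have := hS' x hx
                omega
            · rw [Finset.sum_insert hjS', ← hsum']
              omega
          · rintro ⟨hnn, S, hS, hsum⟩
            have hNne : n.toNat ≠ 0 := by omega
            have hSne : S.Nonempty := by
              by_contra hemp
              rw [Finset.not_nonempty_iff_eq_empty] at hemp
              subst hemp
              simp at hsum
              omega
            obtain ⟨hij, hj17⟩ := hS (S.min' hSne) (S.min'_mem hSne)
            refine ⟨S.min' hSne, List.mem_range'_1.mpr ⟨hij, by omega⟩, ?_⟩
            rw [pvPowerA_getD (S.min' hSne) hj17]
            rw [ih (17 - (S.min' hSne + 1)) (by omega) (S.min' hSne + 1) rfl (by omega)]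
            have h3nn : (0:ℤ) ≤ 3 ^ S.min' hSne := by positivity
            have hcast : ((3 ^ S.min' hSne : ℕ) : ℤ) = (3:ℤ) ^ S.min' hSne := by push_cast; ring
            have hPle : (3:ℕ) ^ S.min' hSne ≤ n.toNat := by
              rw [hsum]
              exact Finset.single_le_sum (fun x _ => Nat.zero_le _) (S.min'_mem hSne)
            have hsub : (n - (3:ℤ) ^ S.min' hSne).toNat = n.toNat - 3 ^ S.min' hSne := by omega
            refine ⟨by omega, S.erase (S.min' hSne), ?_, ?_⟩
            · intro x hx
              have hxS := Finset.mem_of_mem_erase hx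
              have hxj := Finset.ne_of_mem_erase hx
              have h1 := S.min'_le x hxS
              have h2 := (hS x hxS).2
              omega
            · have hse : ∑ j ∈ S.erase (S.min' hSne), 3 ^ j + 3 ^ (S.min' hSne) = ∑ j ∈ S, 3 ^ j :=
                Finset.sum_erase_add S _ (S.min'_mem hSne)
              rw [hsub]
              omega

theorem pvRep_succ (k N : ℕ) : pvRep 0 (k + 1) N ↔ N % 3 ≤ 1 ∧ pvRep 0 k (N / 3) := by
  constructor
  · rintro ⟨S, hS, rfl⟩
    have hT1 : ∀ x ∈ S.erase 0, 1 ≤ x ∧ x < k + 1 := by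
      intro x hx
      have hxS := Finset.mem_of_mem_erase hx
      have hx0 : x ≠ 0 := Finset.ne_of_mem_erase hx
      exact ⟨by omega, (hS x hxS).2⟩
    have hsum3 : ∑ j ∈ S.erase 0, 3 ^ j = 3 * ∑ j ∈ (S.erase 0).image (· - 1), 3 ^ j := by
      rw [Finset.sum_image (by
        intro x hx y hy hxy
        have hxy' : x - 1 = y - 1 := hxy
        have := (hT1 x hx).1
        have := (hT1 y hy).1
        omega)]
      rw [Finset.mul_sum]
      apply Finset.sum_congr rfl
      intro x hx
      obtain ⟨m, rfl⟩ : ∃ m, x = m + 1 := ⟨x - 1, by have := (hT1 x hx).1; omega⟩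
      simp [pow_succ']
    have himg : ∀ j ∈ (S.erase 0).image (· - 1), 0 ≤ j ∧ j < k := by
      intro j hj
      obtain ⟨x, hx, rfl⟩ := Finset.mem_image.mp hj
      have := hT1 x hx
      omega
    by_cases h0 : 0 ∈ S
    · have hsplit : ∑ j ∈ S, 3 ^ j = ∑ j ∈ S.erase 0, 3 ^ j + 1 := by
        rw [← Finset.sum_erase_add S _ h0]
        norm_num
      rw [hsplit, hsum3]
      set M := ∑ j ∈ (S.erase 0).image (· - 1), 3 ^ j with hM
      have hdiv : (3 * M + 1) / 3 = M := by omega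
      rw [hdiv]
      exact ⟨by omega, (S.erase 0).image (· - 1), himg, rfl⟩
    · have hTS : S.erase 0 = S := Finset.erase_eq_of_notMem h0
      rw [← hTS, hsum3]
      set M := ∑ j ∈ (S.erase 0).image (· - 1), 3 ^ j with hM
      have hdiv : 3 * M / 3 = M := by omega
      rw [hdiv]
      exact ⟨by omega, (S.erase 0).image (· - 1), himg, rfl⟩
  · rintro ⟨hmod, S', hS', hM⟩
    have hsum3 : ∑ j ∈ S'.image (· + 1), 3 ^ j = 3 * ∑ j ∈ S', 3 ^ j := by
      rw [Finset.sum_image (by intro x _ y _ h; have h' : x + 1 = y + 1 := h; omega), Finset.mul_sum]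
      exact Finset.sum_congr rfl fun x _ => by rw [pow_succ']
    have hTb : ∀ j ∈ S'.image (· + 1), 0 ≤ j ∧ j < k + 1 := by
      intro j hj
      obtain ⟨x, hx, rfl⟩ := Finset.mem_image.mp hj
      have := (hS' x hx).2
      omega
    by_cases h1 : N % 3 = 1
    · refine ⟨insert 0 (S'.image (· + 1)), ?_, ?_⟩
      · intro j hj
        rcases Finset.mem_insert.mp hj with rfl | hj
        · exact ⟨le_refl 0, by omega⟩
        · exact hTb j hj
      · have h0T : 0 ∉ S'.image (· + 1) := by
          intro h
          obtain ⟨x, _, hx⟩ := Finset.mem_image.mp h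
          omega
        rw [Finset.sum_insert h0T, hsum3, ← hM]
        simp only [pow_zero]
        omega
    · have h0 : N % 3 = 0 := by omega
      refine ⟨S'.image (· + 1), hTb, ?_⟩
      rw [hsum3, ← hM]
      omega

theorem pvRep_zero_iff (k : ℕ) : ∀ N, pvRep 0 k N ↔ pvNoTwo N ∧ N < 3 ^ k := by
  induction k with
  | zero =>
    intro N
    constructor
    · rintro ⟨S, hS, rfl⟩
      have hSe : S = ∅ := Finset.eq_empty_of_forall_notMem fun j hj => Nat.not_lt_zero j (hS j hj).2
      subst hSe; exact ⟨pvNoTwo_zero, by norm_num⟩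
    · rintro ⟨_, hlt⟩
      have : N = 0 := by simpa using Nat.lt_one_iff.mp (by simpa using hlt)
      exact ⟨∅, by simp, by simp [this]⟩
  | succ k ihk =>
    intro N
    rw [pvRep_succ, ihk, pvNoTwo_iff N]
    have hm : N % 3 < 3 := Nat.mod_lt N (by norm_num)
    have hb : N / 3 < 3 ^ k ↔ N < 3 ^ (k + 1) := by
      rw [Nat.div_lt_iff_lt_mul (by norm_num : 0 < 3), ← pow_succ]
    constructor
    · rintro ⟨h1, h2, h3⟩; exact ⟨⟨by omega, h2⟩, hb.mp h3⟩
    · rintro ⟨⟨h1, h2⟩, h3⟩; exact ⟨by omega, h2, hb.mpr h3⟩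

theorem pvA_char (n : Int) :
    checkPowersOfThree_backtracking n = true ↔ 0 ≤ n ∧ pvNoTwo n.toNat ∧ n.toNat < 3 ^ 17 := by
  unfold checkPowersOfThree_backtracking
  rw [pvDpA_char 17 0 rfl (by norm_num) n, pvRep_zero_iff]

-- ===== VERDICT (by name: the statement is the Claim_ definition above) =====
theorem checkPowersOfThree_backtracking_spec : Claim_unchanged_checkPowersOfThree_backtracking := by
  intro n _ hD
  unfold checkPowersOfThree_backtracking_alt
  rw [Bool.eq_iff_iff, pvA_char, pvLoopB_char]
  constructor
  · rintro ⟨h1, h2, _⟩; exact ⟨h1, h2⟩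
  · rintro ⟨h1, h2⟩
    refine ⟨h1, h2, ?_⟩
    by_contra hbig
    apply hD
    unfold D_checkPowersOfThree_backtracking
    refine ⟨?_, (pvDigits_all_iff n.toNat).mpr h2⟩
    have h3 : (3:ℤ) ^ 17 = 129140163 := by norm_num
    have h4 : (3:ℕ) ^ 17 = 129140163 := by norm_num
    omega

theorem checkPowersOfThree_backtracking_changed : Claim_changed_checkPowersOfThree_backtracking := by
  unfold Claim_changed_checkPowersOfThree_backtracking
  have hD : D_checkPowersOfThree_backtracking pvDiffWitness_checkPowersOfThree_backtracking := by decide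
  refine ⟨by decide, hD, ?_, ?_, by decide⟩
  · have := (pvA_char pvDiffWitness_checkPowersOfThree_backtracking)
    rw [pvDiffWitnessOut_checkPowersOfThree_backtracking]
    by_contra hne
    have htrue : checkPowersOfThree_backtracking pvDiffWitness_checkPowersOfThree_backtracking = true := by
      cases h : checkPowersOfThree_backtracking pvDiffWitness_checkPowersOfThree_backtracking
      · exact absurd h hne
      · rfl
    have := this.mp htrue
    have h4 : (3:ℕ) ^ 17 = 129140163 := by norm_num
    have h5 : pvDiffWitness_checkPowersOfThree_backtracking.toNat = 129140163 := by decide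
    omega
  · rw [pvDiffWitnessOut_checkPowersOfThree_backtracking]
    unfold checkPowersOfThree_backtracking_alt
    rw [pvLoopB_char]
    refine ⟨by decide, ?_⟩
    have := hD.2
    rw [pvDigits_all_iff] at this
    exact this

theorem checkPowersOfThree_backtracking_tight : Claim_exact_checkPowersOfThree_backtracking := by
  intro n _ hD
  have hA : checkPowersOfThree_backtracking n ≠ true := by
    intro hh
    rw [pvA_char] at hh
    obtain ⟨h1, _, h3⟩ := hh
    have h4 : (3:ℕ) ^ 17 = 129140163 := by norm_num
    have h5 : (3:ℤ) ^ 17 = 129140163 := by norm_num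
    have := hD.1
    omega
  have hB : checkPowersOfThree_backtracking_alt n = true := by
    unfold checkPowersOfThree_backtracking_alt
    rw [pvLoopB_char]
    have h5 : (3:ℤ) ^ 17 = 129140163 := by norm_num
    exact ⟨by have := hD.1; omega, (pvDigits_all_iff n.toNat).mp hD.2⟩
  intro h
  rw [hB] at h
  exact hA h
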